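-- pv_equiv track=rewrite | github.com/Poryaei/pine-script-validator | src/pinescript_validator/ast_validator.py | split_generic_type
-- ===== SOURCE A (Python) =====
-- def split_generic_type(type_name: str) -> tuple[str, list[str] | None]:
--     lt_index = type_name.find("<")
--     if lt_index == -1 or not type_name.endswith(">"):
--         return type_name, None
--
--     outer_name = type_name[:lt_index].strip()
--     inner = type_name[lt_index + 1 : -1]
--     args: list[str] = []
--     start = 0
--     depth = 0
--     for index, char in enumerate(inner):
--         if char == "<":
--             depth += 1
--         elif char == ">":
--             depth -= 1
--         elif char == "," and depth == 0:
--             args.append(inner[start:index].strip())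
--             start = index + 1
--     args.append(inner[start:].strip())
--     if any(not arg for arg in args):
--         return outer_name, []
--     return outer_name, args
-- ===== SOURCE B (Python) =====
-- def _first_top_comma(s):
--     depth = 0
--     for j, ch in enumerate(s):
--         if ch == "<":
--             depth += 1
--         elif ch == ">":
--             depth -= 1
--         elif ch == "," and depth == 0:
--             return j
--     return None
--
--
-- def _top_level_parts(s):
--     parts = []
--     while True:
--         cut = _first_top_comma(s)
--         if cut is None:
--             parts.append(s.strip())
--             return parts
--         parts.append(s[:cut].strip())
--         s = s[cut + 1:]
--
--
-- def split_generic_type(type_name: str) -> tuple[str, list[str] | None]: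
--     if type_name.endswith(">"):
--         i = type_name.find("<")
--         if i != -1:
--             name = type_name[:i].strip()
--             parts = _top_level_parts(type_name[i + 1:-1])
--             return name, (parts if all(parts) else [])
--     return type_name, None
-- ===== Notes on version B (the rewrite author's own statement) =====
-- stated objective: alternative
-- what changed: Instead of one fold over enumerate(inner) carrying (args, start, depth) state, B repeatedly locates the first top-level comma with a helper scan and peels the stripped prefix off in a while loop, so the argument list is built by successive slice-and-recurse steps rather than by index bookkeeping inside a single pass.
import Mathlib
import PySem

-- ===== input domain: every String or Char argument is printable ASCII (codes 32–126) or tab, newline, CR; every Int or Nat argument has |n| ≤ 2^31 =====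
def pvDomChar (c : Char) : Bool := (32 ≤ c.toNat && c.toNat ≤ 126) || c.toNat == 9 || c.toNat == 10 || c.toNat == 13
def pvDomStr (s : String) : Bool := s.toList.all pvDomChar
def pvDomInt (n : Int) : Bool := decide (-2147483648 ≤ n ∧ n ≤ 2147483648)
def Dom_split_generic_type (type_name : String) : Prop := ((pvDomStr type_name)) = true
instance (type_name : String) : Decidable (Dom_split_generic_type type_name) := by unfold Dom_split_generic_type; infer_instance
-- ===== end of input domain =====

-- B splits the generic arguments by repeatedly finding the first top-level comma and peeling off the prefix, instead of A's single indexed depth-tracking fold; equal return value proved on all inputs.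

-- ===== PORT A =====
-- one step of A's `for index, char in enumerate(inner)` loop; state = (args, start, depth)
def pvAStep (inner : List Char) (st : List (List Char) × Int × Int) (p : Int × Char) :
    List (List Char) × Int × Int :=
  if p.2 = '<' then (st.1, st.2.1, st.2.2 + 1)
  else if p.2 = '>' then (st.1, st.2.1, st.2.2 - 1)
  else if p.2 = ',' ∧ st.2.2 = 0 then
    (st.1 ++ [PySem.Chars.strip (PySem.List.slice inner (some st.2.1) (some p.1))], p.1 + 1, st.2.2)
  else st

-- A's loop plus the final `args.append(inner[start:].strip())`
def pvAArgs (inner : List Char) : List (List Char) :=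
  let st := List.foldl (pvAStep inner) ([], 0, 0) (PySem.List.enumerate inner 0)
  st.1 ++ [PySem.Chars.strip (PySem.List.slice inner (some st.2.1) none)]

def split_generic_type (type_name : String) : String × Option (List String) :=
  let lt_index := PySem.Str.find type_name "<"
  if lt_index = -1 ∨ ¬ PySem.Str.endswith type_name ">" then (type_name, none)
  else
    let outer_name := PySem.Str.strip (PySem.Str.slice type_name none (some lt_index))
    let inner := (PySem.Str.slice type_name (some (lt_index + 1)) (some (-1))).toList
    let args := pvAArgs inner
    if args.any (fun a => a.isEmpty) then (outer_name, some [])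
    else (outer_name, some (args.map String.ofList))

-- ===== PORT B =====
-- `_first_top_comma`: B's depth scan returning the index of the first top-level comma
def pvFirst : List Char → Int → Nat → Option Nat
  | [], _, _ => none
  | c :: cs, depth, j =>
    if c = ',' ∧ depth = 0 then some j
    else pvFirst cs (if c = '<' then depth + 1 else if c = '>' then depth - 1 else depth) (j + 1)

-- termination helper for pvParts (cited by decreasing_by)
lemma pvFirst_bound : ∀ (cs : List Char) (d : Int) (j k : Nat),
    pvFirst cs d j = some k → k < j + cs.length := by
  intro cs
  induction cs with
  | nil => intro d j k h; simp [pvFirst] at h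
  | cons c rest ih =>
    intro d j k h
    rw [pvFirst] at h
    by_cases hc : c = ',' ∧ d = 0
    · rw [if_pos hc] at h
      have hj : j = k := Option.some.inj h
      subst hj
      simp
    · rw [if_neg hc] at h
      have := ih _ _ _ h
      simp only [List.length_cons]
      omega

-- `_top_level_parts`: while loop peeling off the prefix before the first top-level comma
def pvParts (parts : List (List Char)) (s : List Char) : List (List Char) :=
  match h : pvFirst s 0 0 with
  | none => parts ++ [PySem.Chars.strip s]
  | some cut => pvParts (parts ++ [PySem.Chars.strip (s.take cut)]) (s.drop (cut + 1))
  termination_by s.length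
  decreasing_by
    have := pvFirst_bound s 0 0 cut h
    simp only [List.length_drop]
    omega

def split_generic_type_alt (type_name : String) : String × Option (List String) :=
  if PySem.Str.endswith type_name ">" then
    let i := PySem.Str.find type_name "<"
    if i ≠ -1 then
      let name := PySem.Str.strip (PySem.Str.slice type_name none (some i))
      let parts := pvParts [] (PySem.Str.slice type_name (some (i + 1)) (some (-1))).toList
      (name, some (if parts.all (fun p => !p.isEmpty) then parts.map String.ofList else []))
    else (type_name, none)
  else (type_name, none)

-- ===== PRECONDITION & SPEC =====
def Spec_split_generic_type (type_name : String) (out : String × Option (List String)) : Prop := out = split_generic_type_alt type_name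
instance (type_name : String) (out : String × Option (List String)) : Decidable (Spec_split_generic_type type_name out) := by unfold Spec_split_generic_type; infer_instance

-- ===== CLAIM (what is proved, stated in full; the proofs are below) =====
def Claim_equal_split_generic_type : Prop := ∀ (type_name : String), Dom_split_generic_type type_name → Spec_split_generic_type type_name (split_generic_type type_name)

-- ===== LEMMAS AND PROOFS =====

-- canonical reference: group `cs` (buffer so far `buf`, depth `d`) at top-level commas, stripping each group
def pvGroups : List Char → List Char → Int → List (List Char)
  | buf, [], _ => [PySem.Chars.strip buf]
  | buf, c :: cs, d =>
    if c = ',' ∧ d = 0 then PySem.Chars.strip buf :: pvGroups [] cs 0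
    else pvGroups (buf ++ [c]) cs (if c = '<' then d + 1 else if c = '>' then d - 1 else d)

-- A's loop computes pvGroups
lemma pvA_loop (cs : List Char) : ∀ (pre : List Char) (args : List (List Char)) (s : Nat) (d : Int),
    s ≤ pre.length →
    (let st := List.foldl (pvAStep (pre ++ cs)) (args, (s : Int), d)
        (PySem.List.enumerate cs (pre.length : Int));
     st.1 ++ [PySem.Chars.strip (PySem.List.slice (pre ++ cs) (some st.2.1) none)])
      = args ++ pvGroups (pre.drop s) cs d := by
  induction cs with
  | nil =>
    intro pre args s d hs
    simp only [PySem.List.enumerate, List.foldl_nil, List.append_nil, pvGroups]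
    rw [PySem.List.slice_from pre (Int.natCast_nonneg s)]
    simp
  | cons c cs ih =>
    intro pre args s d hs
    rw [show pre ++ c :: cs = (pre ++ [c]) ++ cs by simp]
    rw [PySem.List.enumerate_cons, List.foldl_cons]
    have hlen : (pre.length : Int) + 1 = ((pre ++ [c]).length : Int) := by simp
    have hdrop : (pre ++ [c]).drop s = pre.drop s ++ [c] :=
      List.drop_append_of_le_length hs
    by_cases h1 : c = '<'
    · rw [show pvAStep ((pre ++ [c]) ++ cs) (args, (s:Int), d) ((pre.length : Int), c)
           = (args, (s:Int), d + 1) by simp [pvAStep, h1]]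
      rw [hlen, ih (pre ++ [c]) args s (d+1) (by simp; omega)]
      rw [hdrop]
      simp [pvGroups, h1]
    · by_cases h2 : c = '>'
      · rw [show pvAStep ((pre ++ [c]) ++ cs) (args, (s:Int), d) ((pre.length : Int), c)
             = (args, (s:Int), d - 1) by simp [pvAStep, h2]]
        rw [hlen, ih (pre ++ [c]) args s (d-1) (by simp; omega)]
        rw [hdrop]
        simp [pvGroups, h2]
      · by_cases h3 : c = ',' ∧ d = 0
        · have hslice : PySem.List.slice ((pre ++ [c]) ++ cs) (some (s : Int)) (some (pre.length : Int))
              = pre.drop s := by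
            rw [PySem.List.slice_natCast]
            rw [List.drop_append_of_le_length (show s ≤ (pre ++ [c]).length by simp; omega)]
            rw [List.drop_append_of_le_length hs, List.append_assoc]
            rw [show pre.length - s = (pre.drop s).length by simp]
            exact List.take_left
          have h4 := hslice
          simp only [h3.1, List.append_assoc, List.singleton_append] at h4
          rw [show pvAStep ((pre ++ [c]) ++ cs) (args, (s:Int), d) ((pre.length : Int), c)
               = (args ++ [PySem.Chars.strip (pre.drop s)], (pre.length : Int) + 1, d) by
                simp [pvAStep, h3.1, h3.2, h4]]
          rw [hlen]
          rw [show ((pre ++ [c]).length : Int) = (((pre ++ [c]).length : Nat) : Int) by simp]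
          rw [ih (pre ++ [c]) _ (pre ++ [c]).length d (le_refl _)]
          simp [pvGroups, h3.1, h3.2]
        · rw [show pvAStep ((pre ++ [c]) ++ cs) (args, (s:Int), d) ((pre.length : Int), c)
               = (args, (s:Int), d) by simp [pvAStep, h1, h2, h3]]
          rw [hlen, ih (pre ++ [c]) args s d (by simp; omega)]
          rw [hdrop]
          simp only [pvGroups, h3, if_false, h1, h2, if_false]

-- pvFirst with a shifted start index
lemma pvFirst_shift (cs : List Char) : ∀ (d : Int) (j : Nat),
    pvFirst cs d j = (pvFirst cs d 0).map (· + j) := by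
  induction cs with
  | nil => intro d j; simp [pvFirst]
  | cons c rest ih =>
    intro d j
    by_cases hc : c = ',' ∧ d = 0
    · simp [pvFirst, hc]
    · rw [pvFirst, pvFirst, if_neg hc, if_neg hc, ih _ (j + 1), ih _ (0 + 1)]
      cases pvFirst rest (if c = '<' then d + 1 else if c = '>' then d - 1 else d) 0 with
      | none => simp
      | some k => simp; omega

-- pvGroups characterised by the first top-level comma
lemma pvGroups_first (cs : List Char) : ∀ (buf : List Char) (d : Int),
    pvGroups buf cs d =
      match pvFirst cs d 0 with
      | none => [PySem.Chars.strip (buf ++ cs)]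
      | some k => PySem.Chars.strip (buf ++ cs.take k) :: pvGroups [] (cs.drop (k + 1)) 0 := by
  induction cs with
  | nil => intro buf d; simp [pvFirst, pvGroups]
  | cons c rest ih =>
    intro buf d
    by_cases hc : c = ',' ∧ d = 0
    · simp [pvGroups, pvFirst, hc]
    · rw [pvGroups, if_neg hc, pvFirst, if_neg hc, pvFirst_shift, ih]
      cases h : pvFirst rest (if c = '<' then d + 1 else if c = '>' then d - 1 else d) 0 with
      | none => simp
      | some k => simp [List.take_succ_cons, List.drop_succ_cons]

-- B's while loop computes pvGroups
lemma pvParts_eq_pvGroups : ∀ (n : Nat) (s : List Char), s.length ≤ n →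
    ∀ (parts : List (List Char)), pvParts parts s = parts ++ pvGroups [] s 0 := by
  intro n
  induction n with
  | zero =>
    intro s hs parts
    have : s = [] := by cases s <;> simp_all
    subst this
    rw [pvParts]
    simp [pvFirst, pvGroups]
  | succ n ih =>
    intro s hs parts
    rw [pvParts]
    split
    · rename_i heq
      rw [pvGroups_first, heq]
      simp
    · rename_i cut heq
      rw [ih (s.drop (cut + 1)) (by simp; omega)]
      rw [pvGroups_first s [] 0, heq]
      simp

lemma pvAArgs_eq_pvParts (inner : List Char) : pvAArgs inner = pvParts [] inner := by
  have hA := pvA_loop inner [] [] 0 0 (le_refl _)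
  simp only [List.length_nil, Nat.cast_zero, List.nil_append, List.drop_nil] at hA
  rw [pvParts_eq_pvGroups inner.length inner (le_refl _)]
  simpa using hA

-- ===== VERDICT (by name: the statement is the Claim_ definition above) =====
theorem split_generic_type_spec : Claim_equal_split_generic_type := by
  intro type_name _
  unfold Spec_split_generic_type split_generic_type split_generic_type_alt
  by_cases hE : PySem.Chars.endswith type_name.toList ['>'] = true
  · by_cases hI : PySem.Chars.find type_name.toList ['<'] = -1
    · simp [hE, hI]
    · simp [hE, hI, pvAArgs_eq_pvParts]
      split_ifs with h1 h2 h2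
      · exact absurd rfl (h2 [] h1)
      · rfl
      · rfl
      · rw [not_forall] at h2
        obtain ⟨x, hx2⟩ := h2
        rw [not_forall] at hx2
        obtain ⟨hx, hxe⟩ := hx2
        rw [not_not] at hxe
        exact absurd (hxe ▸ hx) h1
  · rw [Bool.not_eq_true] at hE
    simp [hE]
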